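-- pv_equiv track=rewrite | github.com/YoussefTrabelsi1/Leetcode_solutions | Python/Number of Smooth Descent Periods of a Stock/solution4_two_pointers_segments.py | getDescentPeriods
-- ===== SOURCE A (Python) =====
-- from typing import List
--
-- def getDescentPeriods(prices: List[int]) -> int:
--     n = len(prices)
--     ans = 0
--     i = 0
--
--     while i < n:
--         j = i
--         while j + 1 < n and prices[j] - prices[j + 1] == 1:
--             j += 1
--         L = j - i + 1
--         ans += L * (L + 1) // 2
--         i = j + 1
--
--     return ans
-- ===== SOURCE B (Python) =====
-- from typing import List
--
-- def getDescentPeriods(prices: List[int]) -> int: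
--     ans = 0
--     cur = 0
--     prev = None
--     for p in prices:
--         if prev is not None and prev - p == 1:
--             cur += 1
--         else:
--             cur = 1
--         ans += cur
--         prev = p
--     return ans
-- ===== Notes on version B (the rewrite author's own statement) =====
-- stated objective: alternative
-- what changed: Replaced the segment-finding inner while loop plus the per-segment triangular-number formula L*(L+1)//2 with a single element-wise pass that maintains a running descent-run length cur and adds it to the answer at each element.
import Mathlib
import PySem

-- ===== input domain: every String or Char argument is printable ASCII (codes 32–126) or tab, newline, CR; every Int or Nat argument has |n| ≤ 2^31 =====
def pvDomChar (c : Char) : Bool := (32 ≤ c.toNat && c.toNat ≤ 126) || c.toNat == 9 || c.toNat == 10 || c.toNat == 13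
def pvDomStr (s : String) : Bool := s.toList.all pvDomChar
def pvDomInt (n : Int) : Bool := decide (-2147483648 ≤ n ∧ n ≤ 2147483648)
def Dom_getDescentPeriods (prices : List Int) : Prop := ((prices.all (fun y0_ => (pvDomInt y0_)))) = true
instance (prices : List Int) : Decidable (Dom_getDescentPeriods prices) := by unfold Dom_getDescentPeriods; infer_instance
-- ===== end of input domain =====

-- Port A (segment scan + triangular formula) vs port B: one pass keeping a running
-- descent-run length `cur` added per element (alternative decomposition, same cost).


-- ===== PORT A =====
-- Inner `while j + 1 < n and prices[j] - prices[j+1] == 1: j += 1`: the index pair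
-- (j, suffix after j) becomes (run length past the head, remaining suffix).
def aRun (x : Int) : List Int → Nat × List Int
  | [] => (0, [])
  | y :: rest =>
    if x - y = 1 then
      let p := aRun y rest
      (p.1 + 1, p.2)
    else (0, y :: rest)

theorem aRun_length_le (x : Int) (l : List Int) : (aRun x l).2.length ≤ l.length := by
  induction l generalizing x with
  | nil => simp [aRun]
  | cons y rest ih =>
    simp only [aRun]
    split
    · exact le_trans (ih y) (Nat.le_succ _)
    · simp

-- Outer `while i < n`: each step consumes one maximal descent segment and adds L*(L+1)//2.
def aOuter : List Int → Int
  | [] => 0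
  | x :: rest =>
    let p := aRun x rest
    let L : Int := (p.1 : Int) + 1
    PySem.Int.floordiv (L * (L + 1)) 2 + aOuter p.2
termination_by l => l.length
decreasing_by
  simpa using Nat.lt_succ_of_le (aRun_length_le x rest)

def getDescentPeriods (prices : List Int) : Int := aOuter prices

-- ===== PORT B =====
-- `for p in prices:` with state (prev, cur, ans); the first iteration (prev is None) sets cur = 1.
def bLoop (prev cur ans : Int) : List Int → Int
  | [] => ans
  | p :: rest =>
    let cur' := if prev - p = 1 then cur + 1 else 1
    bLoop p cur' (ans + cur') rest

def getDescentPeriods_alt : List Int → Int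
  | [] => 0
  | p :: rest => bLoop p 1 1 rest

-- ===== PRECONDITION & SPEC =====
def Spec_getDescentPeriods (prices : List Int) (out : Int) : Prop := out = getDescentPeriods_alt prices
instance (prices : List Int) (out : Int) : Decidable (Spec_getDescentPeriods prices out) := by unfold Spec_getDescentPeriods; infer_instance

-- ===== CLAIM (what is proved, stated in full; the proofs are below) =====
def Claim_equal_getDescentPeriods : Prop := ∀ (prices : List Int), Dom_getDescentPeriods prices → Spec_getDescentPeriods prices (getDescentPeriods prices)

-- ===== LEMMAS AND PROOFS =====

-- Along a run of k further descents starting at cur = c, bLoop adds (c+1) + (c+2) + … + (c+k).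
def runSum (c : Int) : Nat → Int
  | 0 => 0
  | k + 1 => (c + 1) + runSum (c + 1) k

theorem runSum_closed (c : Int) (k : Nat) : 2 * runSum c k = (k : Int) * (2 * c + (k : Int) + 1) := by
  induction k generalizing c with
  | zero => simp [runSum]
  | succ k ih =>
    simp only [runSum]
    push_cast
    have := ih (c + 1)
    ring_nf
    ring_nf at this
    omega

theorem bLoop_ans_add (prev cur a d : Int) (l : List Int) :
    bLoop prev cur (a + d) l = d + bLoop prev cur a l := by
  induction l generalizing prev cur a with
  | nil => simp [bLoop]; ring
  | cons p rest ih =>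
    simp only [bLoop]
    rw [show a + d + (if prev - p = 1 then cur + 1 else 1)
          = (a + (if prev - p = 1 then cur + 1 else 1)) + d by ring, ih]

theorem bLoop_run (l : List Int) (x c ans : Int) :
    bLoop x c ans l = ans + runSum c (aRun x l).1 + getDescentPeriods_alt (aRun x l).2 := by
  induction l generalizing x c ans with
  | nil => simp [bLoop, aRun, getDescentPeriods_alt, runSum]
  | cons y rest ih =>
    by_cases h : x - y = 1
    · simp only [bLoop, aRun, h, if_pos]
      rw [ih y (c + 1) (ans + (c + 1))]
      simp only [runSum]
      ring
    · simp only [bLoop, aRun, h, if_false]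
      rw [show ans + 1 = 1 + ans by ring, bLoop_ans_add y 1 1 ans rest]
      simp only [getDescentPeriods_alt]
      simp [runSum]

theorem triangle_eq (k : Nat) :
    PySem.Int.floordiv (((k : Int) + 1) * ((k : Int) + 2)) 2 = 1 + runSum 1 k := by
  rw [PySem.Int.floordiv_eq_iff_of_pos (by omega)]
  have := runSum_closed 1 k
  constructor <;> nlinarith [this]

theorem aOuter_eq_alt (l : List Int) : aOuter l = getDescentPeriods_alt l := by
  induction l using aOuter.induct with
  | case1 => simp [aOuter, getDescentPeriods_alt]
  | case2 x rest p ih =>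
    have hp : p = aRun x rest := rfl
    simp only [aOuter, getDescentPeriods_alt]
    rw [hp] at ih
    rw [bLoop_run rest x 1 1]
    have ht := triangle_eq (aRun x rest).1
    have : ((aRun x rest).1 : Int) + 1 + 1 = ((aRun x rest).1 : Int) + 2 := by ring
    rw [this] at *
    rw [ih] at *
    omega

-- ===== VERDICT (by name: the statement is the Claim_ definition above) =====
theorem getDescentPeriods_spec : Claim_equal_getDescentPeriods := by
  intro prices _
  unfold Spec_getDescentPeriods getDescentPeriods
  exact aOuter_eq_alt prices
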